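-- pv_equiv track=rewrite | github.com/MKFMIKU/CircleFind | check_image.py | _findLastCircle
-- ===== SOURCE A (Python) =====
-- def _findLastCircle(circles):
--     last_w = 0
--     last_h = 10000
--     for circle in circles[0]:
--         if circle[0]>last_w:
--             last_w = circle[0]
--         if circle[1]<last_h:
--             last_h = circle[1]
--     return [last_w,last_h]
-- ===== SOURCE B (Python) =====
-- def _findLastCircle(circles):
--     first = circles[0]
--     ws = sorted([0] + [c[0] for c in first], reverse=True)
--     hs = sorted([10000] + [c[1] for c in first])
--     return [ws[0], hs[0]]
-- ===== Notes on version B (the rewrite author's own statement) =====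
-- stated objective: alternative
-- what changed: Replaces the fused single-pass loop with two accumulators by a sort-then-pick strategy: sort the widths (with sentinel 0) descending and the heights (with sentinel 10000) ascending and return the two heads.
import Mathlib
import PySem

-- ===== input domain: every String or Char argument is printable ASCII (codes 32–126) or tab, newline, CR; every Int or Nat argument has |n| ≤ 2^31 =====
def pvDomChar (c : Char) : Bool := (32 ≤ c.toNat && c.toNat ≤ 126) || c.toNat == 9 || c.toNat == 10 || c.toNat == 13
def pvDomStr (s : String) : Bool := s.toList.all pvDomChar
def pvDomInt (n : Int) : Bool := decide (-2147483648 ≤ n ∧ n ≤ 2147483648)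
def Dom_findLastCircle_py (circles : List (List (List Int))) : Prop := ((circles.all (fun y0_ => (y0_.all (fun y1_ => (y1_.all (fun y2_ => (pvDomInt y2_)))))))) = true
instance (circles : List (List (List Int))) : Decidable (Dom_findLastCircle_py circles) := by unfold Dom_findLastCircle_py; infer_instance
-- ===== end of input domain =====

-- B replaces A's fused single-pass loop by sort-then-pick: sort widths (sentinel 0) descending
-- and heights (sentinel 10000) ascending and take the two heads; return value only.

-- ===== PORT A =====
-- A: one loop over circles[0] updating last_w / last_h; circle[0], circle[1] read with a
-- default that Pre_ makes unreachable (Python raises IndexError there, excluded by Pre_).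
def findLastCircle_py (circles : List (List (List Int))) : List Int :=
  match circles with
  | [] => []  -- circles[0] raises IndexError: excluded by Pre_
  | cs :: _ =>
    let p := cs.foldl (fun (p : Int × Int) c =>
        let w := if PySem.List.pyGetD c 0 0 > p.1 then PySem.List.pyGetD c 0 0 else p.1
        let h := if PySem.List.pyGetD c 1 0 < p.2 then PySem.List.pyGetD c 1 0 else p.2
        (w, h)) (0, 10000)
    [p.1, p.2]

-- ===== PORT B =====
-- B: ws = sorted([0] + widths, reverse=True); hs = sorted([10000] + heights); return [ws[0], hs[0]].
-- ws and hs are nonempty by construction (the sentinel), so ws[0]/hs[0] never raise; pyGetD's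
-- default 0 is unreachable.
def findLastCircle_py_alt (circles : List (List (List Int))) : List Int :=
  match circles with
  | [] => []  -- circles[0] raises IndexError: excluded by Pre_
  | cs :: _ =>
    let ws := PySem.List.sorted (0 :: cs.map (fun c => PySem.List.pyGetD c 0 0)) (fun x => x) true
    let hs := PySem.List.sorted (10000 :: cs.map (fun c => PySem.List.pyGetD c 1 0)) (fun x => x) false
    [PySem.List.pyGetD ws 0 0, PySem.List.pyGetD hs 0 0]

-- ===== PRECONDITION & SPEC =====
-- Pre_ excludes exactly the inputs where Python A raises IndexError: empty circles
-- (circles[0]) and inner circles with fewer than 2 entries (circle[0]/circle[1]).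
def Pre_findLastCircle_py (circles : List (List (List Int))) : Prop :=
  match circles with
  | [] => False
  | cs :: _ => ∀ c ∈ cs, 2 ≤ c.length
instance (circles : List (List (List Int))) : Decidable (Pre_findLastCircle_py circles) := by
  unfold Pre_findLastCircle_py; cases circles <;> infer_instance
def pvWitness_findLastCircle_py : List (List (List Int)) := [[[3, 7], [5, 2]]]
def Spec_findLastCircle_py (circles : List (List (List Int))) (out : List Int) : Prop := out = findLastCircle_py_alt circles
instance (circles : List (List (List Int))) (out : List Int) : Decidable (Spec_findLastCircle_py circles out) := by unfold Spec_findLastCircle_py; infer_instance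

-- ===== CLAIM (what is proved, stated in full; the proofs are below) =====
def Claim_equal_findLastCircle_py : Prop := ∀ (circles : List (List (List Int))), Dom_findLastCircle_py circles → Pre_findLastCircle_py circles → Spec_findLastCircle_py circles (findLastCircle_py circles)

-- ===== LEMMAS AND PROOFS =====

-- A's fused fold equals the pair of independent max/min folds, for any accumulator.
theorem pv_fold_pair (cs : List (List Int)) (w h : Int) :
    cs.foldl (fun (p : Int × Int) c =>
        let w := if PySem.List.pyGetD c 0 0 > p.1 then PySem.List.pyGetD c 0 0 else p.1
        let h := if PySem.List.pyGetD c 1 0 < p.2 then PySem.List.pyGetD c 1 0 else p.2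
        (w, h)) (w, h)
      = ((cs.map (fun c => PySem.List.pyGetD c 0 0)).foldl max w,
         (cs.map (fun c => PySem.List.pyGetD c 1 0)).foldl min h) := by
  induction cs generalizing w h with
  | nil => rfl
  | cons c cs ih =>
    have hw : (if PySem.List.pyGetD c 0 0 > w then PySem.List.pyGetD c 0 0 else w)
        = max w (PySem.List.pyGetD c 0 0) := by rw [max_def]; split_ifs <;> omega
    have hh : (if PySem.List.pyGetD c 1 0 < h then PySem.List.pyGetD c 1 0 else h)
        = min h (PySem.List.pyGetD c 1 0) := by rw [min_def]; split_ifs <;> omega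
    simp only [List.foldl, List.map, hw, hh]
    exact ih _ _

-- foldl max w l is a member of w :: l, and an upper bound of w :: l.
theorem pv_foldl_max_mem (l : List Int) (w : Int) : l.foldl max w ∈ w :: l := by
  induction l generalizing w with
  | nil => simp
  | cons a l ih =>
    rcases List.mem_cons.1 (ih (max w a)) with h | h
    · rw [List.foldl_cons, h]
      rcases max_choice w a with hm | hm <;> rw [hm] <;> simp
    · rw [List.foldl_cons]
      exact List.mem_cons_of_mem _ (List.mem_cons_of_mem _ h)

theorem pv_foldl_max_ub (l : List Int) (w : Int) : ∀ y ∈ w :: l, y ≤ l.foldl max w := by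
  induction l generalizing w with
  | nil => simp
  | cons a l ih =>
    intro y hy
    rcases List.mem_cons.1 hy with rfl | hy
    · exact le_trans (le_max_left y a) (ih (max y a) _ (List.mem_cons_self ..))
    · rcases List.mem_cons.1 hy with rfl | hy
      · exact le_trans (le_max_right w y) (ih (max w y) _ (List.mem_cons_self ..))
      · exact ih (max w a) y (List.mem_cons_of_mem _ hy)

theorem pv_foldl_min_mem (l : List Int) (w : Int) : l.foldl min w ∈ w :: l := by
  induction l generalizing w with
  | nil => simp
  | cons a l ih =>
    rcases List.mem_cons.1 (ih (min w a)) with h | h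
    · rw [List.foldl_cons, h]
      rcases min_choice w a with hm | hm <;> rw [hm] <;> simp
    · rw [List.foldl_cons]
      exact List.mem_cons_of_mem _ (List.mem_cons_of_mem _ h)

theorem pv_foldl_min_lb (l : List Int) (w : Int) : ∀ y ∈ w :: l, l.foldl min w ≤ y := by
  induction l generalizing w with
  | nil => simp
  | cons a l ih =>
    intro y hy
    rcases List.mem_cons.1 hy with rfl | hy
    · exact le_trans (ih (min y a) _ (List.mem_cons_self ..)) (min_le_left y a)
    · rcases List.mem_cons.1 hy with rfl | hy
      · exact le_trans (ih (min w y) _ (List.mem_cons_self ..)) (min_le_right w y)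
      · exact ih (min w a) y (List.mem_cons_of_mem _ hy)

-- head of the descending sort of w :: l is foldl max w l
theorem pv_sorted_rev_head (l : List Int) (w : Int) :
    PySem.List.pyGetD (PySem.List.sorted (w :: l) (fun x => x) true) 0 0 = l.foldl max w := by
  rcases hs : PySem.List.sorted (w :: l) (fun x => x) true with _ | ⟨m, t⟩
  · exact absurd (((PySem.List.sorted_eq_nil_iff _ _ _).mp hs)) (by simp)
  · have hmem : m ∈ w :: l := (PySem.List.mem_sorted _ _ _ _).mp (hs ▸ List.mem_cons_self ..)
    have hub : ∀ y ∈ w :: l, y ≤ m := PySem.List.key_head_sorted_rev_ge _ _ hs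
    have h1 : m ≤ l.foldl max w := pv_foldl_max_ub l w m hmem
    have h2 : l.foldl max w ≤ m := hub _ (pv_foldl_max_mem l w)
    simp [PySem.List.pyGetD, PySem.List.pyGet?, PySem.List.pyIdx?, le_antisymm h1 h2]

-- head of the ascending sort of w :: l is foldl min w l
theorem pv_sorted_head (l : List Int) (w : Int) :
    PySem.List.pyGetD (PySem.List.sorted (w :: l) (fun x => x) false) 0 0 = l.foldl min w := by
  rcases hs : PySem.List.sorted (w :: l) (fun x => x) false with _ | ⟨m, t⟩
  · exact absurd (((PySem.List.sorted_eq_nil_iff _ _ _).mp hs)) (by simp)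
  · have hmem : m ∈ w :: l := (PySem.List.mem_sorted _ _ _ _).mp (hs ▸ List.mem_cons_self ..)
    have hlb : ∀ y ∈ w :: l, m ≤ y := PySem.List.key_head_sorted_le _ _ hs
    have h1 : l.foldl min w ≤ m := pv_foldl_min_lb l w m hmem
    have h2 : m ≤ l.foldl min w := hlb _ (pv_foldl_min_mem l w)
    simp [PySem.List.pyGetD, PySem.List.pyGet?, PySem.List.pyIdx?, le_antisymm h2 h1]

-- ===== VERDICT (by name: the statement is the Claim_ definition above) =====
theorem findLastCircle_py_spec : Claim_equal_findLastCircle_py := by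
  intro circles _ _
  unfold Spec_findLastCircle_py findLastCircle_py findLastCircle_py_alt
  cases circles with
  | nil => rfl
  | cons cs rest =>
    simp only [pv_fold_pair, pv_sorted_rev_head, pv_sorted_head]
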